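-- pv_equiv track=rewrite | github.com/Suryaprabagar/youtube-shorts-automation | modules/script_generator.py | _fallback_script
-- ===== SOURCE A (Python) =====
-- def _fallback_script(topic: str, target_words: int) -> str:
--     """Emergency fallback — builds a script roughly at the target word count."""
--     base = (
--         f"Here is something incredible about {topic}. "
--         "For years scientists thought they understood it, but recent discoveries changed everything. "
--         "The deeper you look, the more mysterious the universe becomes. "
--         "What we know now is just the beginning of a much bigger story. "
--         "Space is not empty — it is full of secrets waiting to be found. "
--         "Every answer leads to ten more questions. "
--         "Subscribe if you want to keep exploring the cosmos with us."
--     )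
--     words = base.split()
--     while len(words) < target_words:
--         words += base.split()
--     return " ".join(words[:target_words])
-- ===== SOURCE B (Python) =====
-- def _fallback_script(topic: str, target_words: int) -> str:
--     """Emergency fallback — builds a script roughly at the target word count."""
--     base = (
--         f"Here is something incredible about {topic}. "
--         "For years scientists thought they understood it, but recent discoveries changed everything. "
--         "The deeper you look, the more mysterious the universe becomes. "
--         "What we know now is just the beginning of a much bigger story. "
--         "Space is not empty — it is full of secrets waiting to be found. "
--         "Every answer leads to ten more questions. "
--         "Subscribe if you want to keep exploring the cosmos with us."
--     )
--     words = base.split()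
--     reps = max(1, -(-target_words // len(words)))
--     return " ".join((words * reps)[:target_words])
-- ===== Notes on version B (the rewrite author's own statement) =====
-- stated objective: simpler
-- what changed: Replaces A's growth while-loop (repeatedly re-splitting and appending base until the list is long enough) with a closed-form repetition count computed by ceiling division, one list multiplication and one slice.
import Mathlib
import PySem

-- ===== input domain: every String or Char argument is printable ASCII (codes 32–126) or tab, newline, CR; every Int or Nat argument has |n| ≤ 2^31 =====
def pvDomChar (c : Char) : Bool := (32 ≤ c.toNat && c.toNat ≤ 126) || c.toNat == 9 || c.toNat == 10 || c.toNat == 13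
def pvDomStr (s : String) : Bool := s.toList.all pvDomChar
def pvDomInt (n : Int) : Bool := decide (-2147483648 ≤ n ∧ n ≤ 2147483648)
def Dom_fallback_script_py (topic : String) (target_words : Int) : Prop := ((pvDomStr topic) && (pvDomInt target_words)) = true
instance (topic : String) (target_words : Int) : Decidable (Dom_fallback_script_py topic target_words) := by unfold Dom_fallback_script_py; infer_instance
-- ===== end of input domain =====

-- B replaces A's growth `while` loop by a closed-form repetition count (ceiling division)
-- plus list multiplication and one slice; objective: simpler (no measured speedup at these sizes).

-- the f-string base text, identical in A and B
def pvBase (topic : String) : String :=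
  "Here is something incredible about " ++ topic ++
  ". For years scientists thought they understood it, but recent discoveries changed everything. " ++
  "The deeper you look, the more mysterious the universe becomes. " ++
  "What we know now is just the beginning of a much bigger story. " ++
  "Space is not empty — it is full of secrets waiting to be found. " ++
  "Every answer leads to ten more questions. " ++
  "Subscribe if you want to keep exploring the cosmos with us."

-- ===== PORT A =====
-- A's `while len(words) < target_words: words += base.split()`; the `base = []` branch is a
-- totality guard only — `base.split()` is never empty (proved below), so it is never taken.
def pvGrowA (base : List String) (target : Int) (words : List String) : List String :=
  if (words.length : Int) < target then
    if base = [] then words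
    else pvGrowA base target (words ++ base)
  else words
termination_by (target - words.length).toNat
decreasing_by
  rename_i h1 h2
  have h3 : 0 < base.length := List.length_pos_iff.2 h2
  simp only [List.length_append]
  omega

def fallback_script_py (topic : String) (target_words : Int) : String :=
  PySem.Str.join " "
    (PySem.List.slice
      (pvGrowA (PySem.Str.split₀ (pvBase topic)) target_words (PySem.Str.split₀ (pvBase topic)))
      none (some target_words))

-- ===== PORT B =====
def fallback_script_py_alt (topic : String) (target_words : Int) : String :=
  PySem.Str.join " "
    (PySem.List.slice
      (PySem.List.pyRepeat (PySem.Str.split₀ (pvBase topic))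
        (max 1 (-(PySem.Int.floordiv (-target_words) ((PySem.Str.split₀ (pvBase topic)).length : Int)))))
      none (some target_words))

-- ===== PRECONDITION & SPEC =====
def Spec_fallback_script_py (topic : String) (target_words : Int) (out : String) : Prop := out = fallback_script_py_alt topic target_words
instance (topic : String) (target_words : Int) (out : String) : Decidable (Spec_fallback_script_py topic target_words out) := by unfold Spec_fallback_script_py; infer_instance

-- ===== CLAIM (what is proved, stated in full; the proofs are below) =====
def Claim_equal_fallback_script_py : Prop := ∀ (topic : String) (target_words : Int), Dom_fallback_script_py topic target_words → Spec_fallback_script_py topic target_words (fallback_script_py topic target_words)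

-- ===== LEMMAS AND PROOFS =====

-- ceiling division a/n as both Pythons compute it: -((-a) // n)
def pvCdiv (a n : Int) : Int := -(PySem.Int.floordiv (-a) n)

theorem pvCdiv_eq (a n : Int) (hn : 0 < n) : pvCdiv a n = -((-a) / n) := by
  simp [pvCdiv, PySem.Int.floordiv_eq_ediv_of_pos hn]

theorem pvCdiv_shift (a n : Int) (hn : 0 < n) : pvCdiv a n = pvCdiv (a - n) n + 1 := by
  rw [pvCdiv_eq _ _ hn, pvCdiv_eq _ _ hn]
  have : -(a - n) = -a + 1 * n := by ring
  rw [this, Int.add_mul_ediv_right _ _ (by omega : n ≠ 0)]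
  ring

theorem pvCdiv_nonpos (a n : Int) (hn : 0 < n) (ha : a ≤ 0) : pvCdiv a n ≤ 0 := by
  have h := (PySem.Int.le_floordiv_iff_mul_le (a := -a) (q := 0) hn).2 (by omega)
  simp only [pvCdiv]; omega

theorem pvCdiv_pos (a n : Int) (hn : 0 < n) (ha : 0 < a) : 1 ≤ pvCdiv a n := by
  have h : ¬ (0 ≤ PySem.Int.floordiv (-a) n) := by
    rw [PySem.Int.le_floordiv_iff_mul_le hn]; omega
  simp only [pvCdiv]; omega

-- the while loop appends exactly ⌈(target - |acc|)/|base|⌉ copies of base (0 if already long enough)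
theorem pvGrowA_spec (base : List String) (hb : base ≠ []) (target : Int) (acc : List String) :
    pvGrowA base target acc =
      acc ++ (List.replicate (pvCdiv (target - acc.length) base.length).toNat base).flatten := by
  have hn : 0 < (base.length : Int) := by
    have := List.length_pos_iff.2 hb; omega
  by_cases h : (acc.length : Int) < target
  · rw [pvGrowA, if_pos h, if_neg hb,
      pvGrowA_spec base hb target (acc ++ base)]
    have hsh := pvCdiv_shift (target - acc.length) (base.length) hn
    have hpos := pvCdiv_pos (target - acc.length) (base.length) hn (by omega)
    have hrec : 0 ≤ pvCdiv (target - (acc ++ base).length) base.length := by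
      have harg : (target : Int) - (acc ++ base).length = target - acc.length - base.length := by
        simp [List.length_append]; ring
      by_cases hz : 0 < target - (acc : List String).length - (base.length : Int)
      · rw [harg]; have := pvCdiv_pos _ _ hn hz; omega
      · rw [harg]; have := pvCdiv_nonpos (target - acc.length - base.length) base.length hn (by omega); omega
    have harg : (target : Int) - (acc ++ base).length = target - acc.length - base.length := by
      simp [List.length_append]; ring
    rw [harg]
    have htn : (pvCdiv (target - acc.length) base.length).toNat
        = (pvCdiv (target - acc.length - base.length) base.length).toNat + 1 := by
      rw [harg] at hrec; omega
    rw [htn, List.replicate_succ, List.flatten_cons, List.append_assoc]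
  · rw [pvGrowA, if_neg h]
    have := pvCdiv_nonpos (target - acc.length) base.length hn (by omega)
    have : (pvCdiv (target - acc.length) base.length).toNat = 0 := by omega
    simp [this]
termination_by (target - acc.length).toNat
decreasing_by
  simp only [List.length_append]
  omega

-- base.split() is never empty: the base text contains a non-space character
theorem split₀_go_ne_nil : ∀ (s cur : List Char) (acc : List (List Char)),
    (s.any (fun c => !PySem.Chars.isspace c) = true ∨ cur ≠ [] ∨ acc ≠ []) →
    PySem.Chars.split₀.go s cur acc ≠ [] := by
  intro s
  induction s with
  | nil =>
    intro cur acc h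
    rw [PySem.Chars.split₀.go.eq_def]
    simp only [List.any_nil] at h
    rcases h with h | h | h
    · exact absurd h (by simp)
    · simp [List.isEmpty_iff, h]
    · by_cases hc : cur.isEmpty
      · simpa [hc] using (by simpa using h : acc.reverse ≠ [])
      · simp [hc]
  | cons c rest ih =>
    intro cur acc h
    rw [PySem.Chars.split₀.go.eq_def]
    by_cases hsp : PySem.Chars.isspace c = true
    · simp only [hsp, if_true]
      by_cases hc : cur.isEmpty
      · rw [if_pos hc]
        apply ih
        rcases h with h | h | h
        · simp only [List.any_cons, hsp, Bool.not_true, Bool.false_or] at h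
          exact Or.inl h
        · exact absurd (List.isEmpty_iff.1 hc) h
        · exact Or.inr (Or.inr h)
      · rw [if_neg hc]
        exact ih _ _ (Or.inr (Or.inr (by simp)))
    · simp only [hsp]
      exact ih _ _ (Or.inr (Or.inl (by simp)))

theorem pvBase_split_ne_nil (topic : String) : PySem.Str.split₀ (pvBase topic) ≠ [] := by
  have h1 : ("Here is something incredible about " : String).toList.any
      (fun c => !PySem.Chars.isspace c) = true := by decide
  have h : (pvBase topic).toList.any (fun c => !PySem.Chars.isspace c) = true := by
    simp only [pvBase, String.toList_append, List.any_append, h1, Bool.true_or]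
  have := split₀_go_ne_nil (pvBase topic).toList [] [] (Or.inl h)
  simp only [PySem.Str.split₀, PySem.Chars.split₀, ne_eq, List.map_eq_nil_iff]
  exact this

-- ===== VERDICT (by name: the statement is the Claim_ definition above) =====
theorem fallback_script_py_spec : Claim_equal_fallback_script_py := by
  intro topic target _
  unfold Spec_fallback_script_py fallback_script_py fallback_script_py_alt
  set w := PySem.Str.split₀ (pvBase topic) with hw
  have hb : w ≠ [] := pvBase_split_ne_nil topic
  have hn : 0 < (w.length : Int) := by
    have := List.length_pos_iff.2 hb; omega
  have hgrow := pvGrowA_spec w hb target w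
  -- it remains to match the two repetition counts
  have hcount : (List.replicate (max 1 (-(PySem.Int.floordiv (-target) (w.length : Int)))).toNat w).flatten
      = w ++ (List.replicate (pvCdiv (target - w.length) w.length).toNat w).flatten := by
    have hsh := pvCdiv_shift target (w.length) hn
    have hkey : (max 1 (pvCdiv target w.length)).toNat
        = (pvCdiv (target - w.length) w.length).toNat + 1 := by
      by_cases hp : 0 < target - (w.length : Int)
      · have h1 := pvCdiv_pos (target - w.length) w.length hn hp
        omega
      · have h1 := pvCdiv_nonpos (target - w.length) w.length hn (by omega)
        omega
    have : max 1 (-(PySem.Int.floordiv (-target) (w.length : Int))) = max 1 (pvCdiv target w.length) := rfl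
    rw [this, hkey, List.replicate_succ, List.flatten_cons]
  rw [hgrow, PySem.List.pyRepeat, hcount]
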